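-- pv_equiv track=rewrite | github.com/lukahabus/IB | 4.py | maxPairs
-- ===== SOURCE A (Python) =====
-- def maxPairs(N, P, A):
--     pairs = 0
--
--     for row in A:
--         dogs = []
--         cats = []
--
--         for i in range(len(row)):
--             if row[i] == "D":
--                 dogs.append(i)
--             elif row[i] == "C":
--                 cats.append(i)
--
--         for dog in dogs:
--             for cat in cats:
--                 if abs(cat - dog) <= P:
--                     pairs += 1
--                     cats.remove(cat)
--                     break
--
--     return pairs
-- ===== SOURCE B (Python) =====
-- def _positions(row, ch):
--     out = []
--     i = row.find(ch)
--     while i != -1: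
--         out.append(i)
--         i = row.find(ch, i + 1)
--     return out
--
--
-- def maxPairs(N, P, A):
--     # Per row: extract dog/cat positions with repeated str.find, then match
--     # them with a single two-pointer sweep (positions come out increasing),
--     # so no per-dog rescan of the cat list is needed.
--     total = 0
--     for row in A:
--         dogs = _positions(row, "D")
--         cats = _positions(row, "C")
--         j = 0
--         for d in dogs:
--             while j < len(cats) and cats[j] < d - P:
--                 j += 1
--             if j < len(cats) and cats[j] <= d + P:
--                 total += 1
--                 j += 1
--     return total
-- ===== Notes on version B (the rewrite author's own statement) =====
-- stated objective: alternative
-- what changed: A rescans (and mutates) the cat list for every dog and collects positions with a per-character index loop; B extracts dog/cat positions via repeated str.find and matches them with a single two-pointer sweep over the increasing position lists, so no per-dog rescan remains.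
import Mathlib
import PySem

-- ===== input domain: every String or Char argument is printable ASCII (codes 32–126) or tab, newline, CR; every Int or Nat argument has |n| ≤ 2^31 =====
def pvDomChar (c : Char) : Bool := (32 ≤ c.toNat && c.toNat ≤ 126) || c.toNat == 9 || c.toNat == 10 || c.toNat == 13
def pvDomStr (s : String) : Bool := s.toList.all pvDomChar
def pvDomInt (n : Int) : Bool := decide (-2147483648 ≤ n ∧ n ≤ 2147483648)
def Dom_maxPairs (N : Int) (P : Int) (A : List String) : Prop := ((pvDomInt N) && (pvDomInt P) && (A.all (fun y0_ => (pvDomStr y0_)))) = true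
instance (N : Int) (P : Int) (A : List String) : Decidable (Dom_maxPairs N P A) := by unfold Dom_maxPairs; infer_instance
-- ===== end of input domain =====

-- B extracts the dog/cat positions with repeated str.find and replaces A's per-dog rescan of the
-- mutated cat list by a single two-pointer sweep per row (a different, sweep-based algorithm).

-- ===== PORT A =====
-- 'for i in range(len(row)): if row[i]=="D": dogs.append(i) elif row[i]=="C": cats.append(i)'
def collectA (row : List Char) : List Int × List Int :=
  (PySem.List.pyRange 0 (row.length : Int) 1).foldl
    (fun (st : List Int × List Int) i =>
      if PySem.List.pyGetD row i ' ' == 'D' then (st.1 ++ [i], st.2)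
      else if PySem.List.pyGetD row i ' ' == 'C' then (st.1, st.2 ++ [i])
      else st) ([], [])

-- inner 'for cat in cats: if abs(cat-dog) <= P: … break' — returns the first matching cat, if any
def catLoopA (P dog : Int) : List Int → Option Int
  | [] => none
  | c :: cs => if |c - dog| ≤ P then some c else catLoopA P dog cs

-- 'for dog in dogs: …'; on a match Python does cats.remove(cat): cat is in the list here, so
-- remove never raises and removes the first occurrence equal to cat — exactly List.erase.
def dogLoopA (P : Int) : List Int → List Int → Int → Int
  | [], _, pairs => pairs
  | d :: ds, cats, pairs =>
    match catLoopA P d cats with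
    | none => dogLoopA P ds cats pairs
    | some c => dogLoopA P ds (cats.erase c) (pairs + 1)

def maxPairs (N : Int) (P : Int) (A : List String) : Int :=
  A.foldl (fun pairs row =>
    let dc := collectA row.toList
    dogLoopA P dc.1 dc.2 pairs) 0

-- ===== PORT B =====
-- '_positions': 'i = row.find(ch); while i != -1: out.append(i); i = row.find(ch, i+1)'.
-- str.find is PySem.Chars.find/findFrom. The fuel argument only makes the while-loop total:
-- row.length + 1 bounds the number of iterations that append (each appends a distinct index),
-- so it is never exhausted; every step is otherwise exactly Python's.
def posGo (row : List Char) (ch : Char) : Nat → Int → List Int → List Int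
  | 0, _, out => out
  | fuel + 1, i, out =>
    if i = -1 then out
    else posGo row ch fuel (PySem.Chars.findFrom row [ch] (i + 1)) (out ++ [i])

def positionsB (row : List Char) (ch : Char) : List Int :=
  posGo row ch (row.length + 1) (PySem.Chars.find row [ch]) []

-- 'while j < len(cats) and cats[j] < d - P: j += 1' — the pointer j is represented by the
-- remaining suffix cats[j:], so advancing j drops the head.
def skipB (P d : Int) : List Int → List Int
  | [] => []
  | c :: cs => if c < d - P then skipB P d cs else c :: cs

-- 'for d in dogs: …' with the suffix cats[j:] threaded through
def twoPtrB (P : Int) : List Int → List Int → Int → Int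
  | [], _, total => total
  | d :: ds, cats, total =>
    match skipB P d cats with
    | [] => twoPtrB P ds [] total
    | c :: rest =>
      if c ≤ d + P then twoPtrB P ds rest (total + 1)
      else twoPtrB P ds (c :: rest) total

def maxPairs_alt (N : Int) (P : Int) (A : List String) : Int :=
  A.foldl (fun total row =>
    twoPtrB P (positionsB row.toList 'D') (positionsB row.toList 'C') total) 0

-- ===== PRECONDITION & SPEC =====
def Spec_maxPairs (N : Int) (P : Int) (A : List String) (out : Int) : Prop := out = maxPairs_alt N P A
instance (N : Int) (P : Int) (A : List String) (out : Int) : Decidable (Spec_maxPairs N P A out) := by unfold Spec_maxPairs; infer_instance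

-- ===== CLAIM (what is proved, stated in full; the proofs are below) =====
def Claim_equal_maxPairs : Prop := ∀ (N : Int) (P : Int) (A : List String), Dom_maxPairs N P A → Spec_maxPairs N P A (maxPairs N P A)

-- ===== LEMMAS AND PROOFS =====

-- proof-side reference list: the positions (from offset s) of the characters equal to ch
def occAux (ch : Char) : List Char → Int → List Int
  | [], _ => []
  | c :: cs, s => if c == ch then s :: occAux ch cs (s + 1) else occAux ch cs (s + 1)

lemma occAux_length_le (ch : Char) (l : List Char) : ∀ s : Int, (occAux ch l s).length ≤ l.length := by
  induction l with
  | nil => intro s; simp [occAux]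
  | cons c cs ih =>
    intro s
    by_cases h : c = ch
    · simp only [occAux, h, beq_self_eq_true, if_true, List.length_cons]
      exact Nat.succ_le_succ (ih _)
    · simp only [occAux, List.length_cons, beq_iff_eq, if_neg h]
      exact Nat.le_succ_of_le (ih _)

lemma occAux_eq_nil (ch : Char) (l : List Char) (h : ch ∉ l) : ∀ s : Int, occAux ch l s = [] := by
  induction l with
  | nil => intro s; rfl
  | cons c cs ih =>
    intro s
    have h1 : c ≠ ch := fun he => h (by simp [he])
    simp only [occAux, beq_iff_eq, if_neg h1]
    exact ih (fun hm => h (by simp [hm])) _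

-- the filtered-enumerate view of occAux (gives strict monotonicity for free)
lemma occAux_eq_enum (ch : Char) (l : List Char) : ∀ s : Int,
    ((PySem.List.enumerate l s).filter (fun p => p.2 == ch)).map (·.1) = occAux ch l s := by
  induction l with
  | nil => intro s; rfl
  | cons c cs ih =>
    intro s
    rw [PySem.List.enumerate_cons]
    by_cases h : c = ch
    · simp [occAux, h, ← ih]
    · simp [occAux, h, ← ih]

lemma occAux_pairwise (ch : Char) (l : List Char) (s : Int) :
    (occAux ch l s).Pairwise (· < ·) := by
  rw [← occAux_eq_enum]
  rw [List.pairwise_map]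
  exact (PySem.List.pairwise_lt_enumerate l s).filter _

-- a one-character needle is a prefix of row.drop i exactly when row[i] is that character
lemma prefix_char (row : List Char) (ch : Char) (i : Nat) (h : i < row.length) :
    [ch] <+: row.drop i ↔ row[i] = ch := by
  rw [List.drop_eq_getElem_cons h, List.cons_prefix_cons]
  simp [eq_comm]

-- occAux ignores a stretch known to contain no ch
lemma occAux_skip (row : List Char) (ch : Char) :
    ∀ (d k : Nat), k + d ≤ row.length →
    (∀ i (_ : i < row.length), k ≤ i → i < k + d → row[i] ≠ ch) →
    occAux ch (row.drop k) k = occAux ch (row.drop (k + d)) (k + d) := by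
  intro d
  induction d with
  | zero => intro k _ _; rfl
  | succ d ih =>
    intro k hlen hno
    have hk : k < row.length := by omega
    rw [List.drop_eq_getElem_cons hk]
    have hne : row[k] ≠ ch := hno k hk le_rfl (by omega)
    simp only [occAux, beq_iff_eq, if_neg hne]
    have hc1 : ((k : Int) + 1) = ((k + 1 : Nat) : Int) := by push_cast; ring
    rw [hc1, ih (k + 1) (by omega) (fun i hi h1 h2 => hno i hi (by omega) (by omega))]
    have e1 : k + 1 + d = k + (d + 1) := by omega
    rw [e1]
    congr 1
    push_cast
    ring

-- the find-driven while-loop computes occAux, given enough fuel for the remaining occurrences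
lemma posGo_eq (row : List Char) (ch : Char) :
    ∀ (fuel : Nat) (k : Nat) (out : List Int), k ≤ row.length →
    (occAux ch (row.drop k) k).length ≤ fuel →
    posGo row ch fuel (PySem.Chars.findFrom row [ch] (k : Int)) out
      = out ++ occAux ch (row.drop k) (k : Int) := by
  intro fuel
  induction fuel with
  | zero =>
    intro k out _ hf
    have : occAux ch (row.drop k) (k : Int) = [] :=
      List.eq_nil_of_length_eq_zero (Nat.le_zero.1 hf)
    simp [posGo, this]
  | succ fuel ih =>
    intro k out hk hf
    by_cases hneg : PySem.Chars.findFrom row [ch] (k : Int) = -1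
    · have hnin : ¬ [ch] <:+: row.drop k :=
        (PySem.Chars.findFrom_natCast_eq_neg_one_iff row [ch] k hk).1 hneg
      have : ch ∉ row.drop k := fun hm => hnin ((List.singleton_infix_iff ch _).2 hm)
      simp [posGo, hneg, occAux_eq_nil ch _ this]
    · obtain ⟨h1, h2, h3⟩ := PySem.Chars.findFrom_natCast_spec row [ch] k hk hneg
      set j : Int := PySem.Chars.findFrom row [ch] (k : Int) with hj
      have hj0 : 0 ≤ j := le_trans (Int.natCast_nonneg k) h1
      have hjlt : j.toNat < row.length := by
        have := h2.length_le
        simp only [List.length_singleton, List.length_drop] at this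
        omega
      have hjch : row[j.toNat] = ch := (prefix_char row ch j.toNat hjlt).1 h2
      have hkj : k ≤ j.toNat := by omega
      -- skip the ch-free stretch [k, j.toNat)
      have hskip : occAux ch (row.drop k) (k : Int) = occAux ch (row.drop j.toNat) ((j.toNat : Nat) : Int) := by
        have h := occAux_skip row ch (j.toNat - k) k (by omega) (by
          intro i hi hki hilt
          intro hch
          exact h3 i hki (by omega) ((prefix_char row ch i hi).2 hch))
        have e2 : k + (j.toNat - k) = j.toNat := by omega
        rw [e2] at h
        rw [h]
        congr 1
        omega
      have hstep : occAux ch (row.drop j.toNat) ((j.toNat : Nat) : Int)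
          = j :: occAux ch (row.drop (j.toNat + 1)) ((j.toNat + 1 : Nat) : Int) := by
        rw [List.drop_eq_getElem_cons hjlt]
        simp only [occAux, hjch, beq_self_eq_true, if_true]
        congr 1
        omega
      have hcast : j + 1 = ((j.toNat + 1 : Nat) : Int) := by omega
      rw [hskip, hstep] at hf
      simp only [List.length_cons] at hf
      simp only [posGo, if_neg hneg, hcast]
      rw [ih (j.toNat + 1) (out ++ [j]) (by omega) (by omega)]
      rw [hskip, hstep]
      simp

lemma positionsB_eq (row : List Char) (ch : Char) :
    positionsB row ch = occAux ch row 0 := by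
  unfold positionsB
  rw [← PySem.Chars.findFrom_zero]
  have h0 : ((0 : Nat) : Int) = (0 : Int) := rfl
  have := posGo_eq row ch (row.length + 1) 0 [] (Nat.zero_le _)
    (by simpa using Nat.le_succ_of_le (occAux_length_le ch row 0))
  simpa using this

-- collectA's fold over enumerate-shaped pairs, with generalized accumulators
lemma collect_fold_eq (l : List (Int × Char)) (dacc cacc : List Int) :
    l.foldl (fun (st : List Int × List Int) (p : Int × Char) =>
      if p.2 == 'D' then (st.1 ++ [p.1], st.2)
      else if p.2 == 'C' then (st.1, st.2 ++ [p.1])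
      else st) (dacc, cacc)
    = (dacc ++ (l.filter (fun p => p.2 == 'D')).map (·.1),
       cacc ++ (l.filter (fun p => p.2 == 'C')).map (·.1)) := by
  induction l generalizing dacc cacc with
  | nil => simp
  | cons p t ih =>
    simp only [List.foldl_cons, List.filter_cons, beq_iff_eq] at ih ⊢
    by_cases h1 : p.2 = 'D'
    · simp [h1, ih]
    · by_cases h2 : p.2 = 'C'
      · simp [h2, ih]
      · simp [h1, h2, ih]

lemma collectA_eq (row : List Char) :
    collectA row = (occAux 'D' row 0, occAux 'C' row 0) := by
  unfold collectA
  have he := PySem.List.enumerate_eq_map_pyRange row ' '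
  have : (PySem.List.enumerate row 0).foldl
      (fun (st : List Int × List Int) (p : Int × Char) =>
        if p.2 == 'D' then (st.1 ++ [p.1], st.2)
        else if p.2 == 'C' then (st.1, st.2 ++ [p.1])
        else st) ([], []) =
      (PySem.List.pyRange 0 (row.length : Int) 1).foldl
      (fun (st : List Int × List Int) i =>
        if PySem.List.pyGetD row i ' ' == 'D' then (st.1 ++ [i], st.2)
        else if PySem.List.pyGetD row i ' ' == 'C' then (st.1, st.2 ++ [i])
        else st) ([], []) := by
    rw [he, List.foldl_map]
    simp
  rw [← this, collect_fold_eq]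
  simp [occAux_eq_enum]

lemma catLoopA_none {P d : Int} {l : List Int} (h : ∀ x ∈ l, ¬ |x - d| ≤ P) :
    catLoopA P d l = none := by
  induction l with
  | nil => rfl
  | cons c cs ih =>
    simp only [catLoopA]
    rw [if_neg (h c (by simp))]
    exact ih (fun x hx => h x (by simp [hx]))

lemma catLoopA_append {P d : Int} {l1 l2 : List Int} (h : ∀ x ∈ l1, ¬ |x - d| ≤ P) :
    catLoopA P d (l1 ++ l2) = catLoopA P d l2 := by
  induction l1 with
  | nil => rfl
  | cons c cs ih =>
    simp only [List.cons_append, catLoopA]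
    rw [if_neg (h c (by simp))]
    exact ih (fun x hx => h x (by simp [hx]))

-- skipB splits the list into a dropped prefix (all < d - P) and the kept suffix
lemma skipB_spec (P d : Int) (cats : List Int) :
    ∃ t, cats = t ++ skipB P d cats ∧ ∀ c ∈ t, c < d - P := by
  induction cats with
  | nil => exact ⟨[], by simp [skipB]⟩
  | cons c cs ih =>
    by_cases h : c < d - P
    · obtain ⟨t, ht, hlt⟩ := ih
      refine ⟨c :: t, ?_, ?_⟩
      · simp only [skipB, if_pos h, List.cons_append]
        exact congrArg (c :: ·) ht
      · intro x hx; rcases List.mem_cons.1 hx with rfl | hx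
        · exact h
        · exact hlt x hx
    · exact ⟨[], by simp [skipB, h]⟩

lemma skipB_head {P d : Int} {cats : List Int} {c : Int} {rest : List Int}
    (h : skipB P d cats = c :: rest) : ¬ c < d - P := by
  induction cats with
  | nil => simp [skipB] at h
  | cons x xs ih =>
    simp only [skipB] at h
    split_ifs at h with hx
    · exact ih h
    · cases h; exact hx

-- MAIN INVARIANT: A's remaining cat list is (dead prefix ++ B's suffix), every dead cat
-- lying strictly left of d - P for every remaining dog d.
lemma main_loop (P : Int) (dogs : List Int) :
    ∀ (junk cats : List Int) (acc : Int),
    dogs.Pairwise (· ≤ ·) →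
    (junk ++ cats).Pairwise (· < ·) →
    (∀ c ∈ junk, ∀ d ∈ dogs, c < d - P) →
    dogLoopA P dogs (junk ++ cats) acc = twoPtrB P dogs cats acc := by
  induction dogs with
  | nil => intro junk cats acc _ _ _; rfl
  | cons d ds ih =>
    intro junk cats acc hd hc hj
    obtain ⟨hd1, hd2⟩ := List.pairwise_cons.1 hd
    obtain ⟨t, hcats, ht⟩ := skipB_spec P d cats
    have hjunk_no : ∀ x ∈ junk, ¬ |x - d| ≤ P := by
      intro x hx
      have := hj x hx d (by simp)
      rw [abs_le]; omega
    have ht_no : ∀ x ∈ t, ¬ |x - d| ≤ P := by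
      intro x hx
      have := ht x hx
      rw [abs_le]; omega
    have hno : ∀ x ∈ junk ++ t, ¬ |x - d| ≤ P := by
      intro x hx
      rcases List.mem_append.1 hx with h | h
      · exact hjunk_no x h
      · exact ht_no x h
    have hcats' : junk ++ cats = (junk ++ t) ++ skipB P d cats := by
      conv_lhs => rw [hcats]
      rw [List.append_assoc]
    have hpair' : ((junk ++ t) ++ skipB P d cats).Pairwise (· < ·) := by
      rw [← hcats']; exact hc
    have hjt : ∀ c ∈ junk ++ t, ∀ d' ∈ ds, c < d' - P := by
      intro c hcm d' hd'
      rcases List.mem_append.1 hcm with h | h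
      · exact hj c h d' (by simp [hd'])
      · have := ht c h
        have := hd1 d' hd'
        omega
    simp only [dogLoopA, twoPtrB]
    rw [hcats', catLoopA_append hno]
    cases hs : skipB P d cats with
    | nil =>
      rw [hs] at hpair'
      simp only [catLoopA]
      have := ih (junk ++ t) [] acc hd2 (by simpa using hpair') hjt
      simpa using this
    | cons c rest =>
      have hchead := skipB_head hs
      rw [hs] at hpair'
      by_cases hle : c ≤ d + P
      · have habs : |c - d| ≤ P := by rw [abs_le]; omega
        simp only [catLoopA, if_pos habs, if_pos hle]
        have hcnotin : c ∉ junk ++ t := by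
          intro hmem
          rcases List.mem_append.1 hmem with h | h
          · have := hj c h d (by simp); omega
          · have := ht c h; omega
        rw [List.erase_append_right _ (by simpa using hcnotin), List.erase_cons_head]
        have hpair'' : ((junk ++ t) ++ rest).Pairwise (· < ·) :=
          List.Pairwise.sublist
            (List.Sublist.append (List.Sublist.refl _) (List.sublist_cons_self c rest)) hpair'
        exact ih (junk ++ t) rest (acc + 1) hd2 hpair'' hjt
      · -- head cat is beyond d + P; by sortedness no cat in the suffix matches d
        have hrest_gt : ∀ x ∈ rest, c < x := by
          have hsuf : (c :: rest).Pairwise (· < ·) :=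
            List.Pairwise.sublist (List.sublist_append_right (junk ++ t) (c :: rest)) hpair'
          exact (List.pairwise_cons.1 hsuf).1
        have hnone : catLoopA P d (c :: rest) = none := by
          apply catLoopA_none
          intro x hx
          rcases List.mem_cons.1 hx with rfl | hx
          · rw [abs_le]; omega
          · have := hrest_gt x hx; rw [abs_le]; omega
        rw [hnone]
        simp only [if_neg hle]
        exact ih (junk ++ t) (c :: rest) acc hd2 hpair' hjt

lemma row_eq (P : Int) (row : String) (acc : Int) :
    (let dc := collectA row.toList; dogLoopA P dc.1 dc.2 acc)
    = twoPtrB P (positionsB row.toList 'D') (positionsB row.toList 'C') acc := by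
  simp only [collectA_eq, positionsB_eq]
  have := main_loop P (occAux 'D' row.toList 0) [] (occAux 'C' row.toList 0) acc
    ((occAux_pairwise 'D' row.toList 0).imp le_of_lt)
    (by simpa using occAux_pairwise 'C' row.toList 0)
    (by simp)
  simpa using this

-- the per-row bodies agree, so the folds over the rows agree
lemma folds_eq (P : Int) (A : List String) :
    ∀ acc : Int,
    A.foldl (fun pairs row => let dc := collectA row.toList; dogLoopA P dc.1 dc.2 pairs) acc
    = A.foldl (fun total row =>
        twoPtrB P (positionsB row.toList 'D') (positionsB row.toList 'C') total) acc := by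
  induction A with
  | nil => intro acc; rfl
  | cons row rows ih =>
    intro acc
    simp only [List.foldl_cons]
    rw [row_eq P row acc]
    exact ih _

-- ===== VERDICT (by name: the statement is the Claim_ definition above) =====
theorem maxPairs_spec : Claim_equal_maxPairs := by
  intro N P A _
  unfold Spec_maxPairs maxPairs maxPairs_alt
  exact folds_eq P A 0
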